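-- pv_equiv track=rewrite | github.com/AntonyJohny/Cryptography-Projects-2025-7A | Secure Notes Hybrid Cryptography 1OX22CS054/ciphers.py | _record_non_alpha_and_letters
-- ===== SOURCE A (Python) =====
-- def _record_non_alpha_and_letters(text):
--     """Return (letters_only_upper, non_alpha_positions, j_positions, original_length).
--        letters_only_upper has J replaced by I (Playfair convention).
--        non_alpha_positions: list of (index, char) in original text.
--        j_positions: indices (in letters_only) where original char was J/j.
--     """
--     non_alpha_positions = []
--     letters = []
--     j_positions = []
--     for idx, ch in enumerate(text):
--         if ch.isalpha():
--             up = ch.upper()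
--             if up == 'J':
--                 j_positions.append(len(letters))
--                 up = 'I'
--             letters.append(up)
--         else:
--             non_alpha_positions.append((idx, ch))
--     return ''.join(letters), non_alpha_positions, j_positions, len(text)
-- ===== SOURCE B (Python) =====
-- def _record_non_alpha_and_letters(text):
--     # staged passes: build the uppercased letter table once, then derive each
--     # result from it / from text by its own comprehension
--     letters = [ch.upper() for ch in text if ch.isalpha()]
--     j_positions = [i for i, ch in enumerate(letters) if ch == 'J']
--     letters_only_upper = ''.join('I' if ch == 'J' else ch for ch in letters)
--     non_alpha_positions = [(i, ch) for i, ch in enumerate(text) if not ch.isalpha()]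
--     return letters_only_upper, non_alpha_positions, j_positions, len(text)
-- ===== Notes on version B (the rewrite author's own statement) =====
-- stated objective: simpler
-- what changed: Replaces A's single fused loop maintaining three accumulators by staged passes: build the uppercased letter table once, then derive j_positions, the J->I string and non_alpha_positions each by its own comprehension.
import Mathlib
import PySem

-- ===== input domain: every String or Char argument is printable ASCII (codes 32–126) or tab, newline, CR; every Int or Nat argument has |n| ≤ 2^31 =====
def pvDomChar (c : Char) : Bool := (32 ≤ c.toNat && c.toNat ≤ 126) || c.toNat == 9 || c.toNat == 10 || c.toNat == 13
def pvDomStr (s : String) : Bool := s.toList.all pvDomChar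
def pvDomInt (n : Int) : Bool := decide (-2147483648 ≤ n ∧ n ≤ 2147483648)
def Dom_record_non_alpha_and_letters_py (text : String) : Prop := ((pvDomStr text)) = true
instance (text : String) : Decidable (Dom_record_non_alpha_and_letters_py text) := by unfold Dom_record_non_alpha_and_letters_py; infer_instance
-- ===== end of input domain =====

-- B restructures A's single fused loop into staged comprehension passes over an
-- intermediate uppercased-letters table; same values, objective: simpler.

-- ===== PORT A =====
-- the for-loop of A: one fused pass keeping the three accumulators
def pyA_loop : List (Int × Char) → List Char → List (Int × String) → List Int →
    (List Char × List (Int × String) × List Int)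
  | [], letters, na, jp => (letters, na, jp)
  | (idx, ch) :: rest, letters, na, jp =>
    if PySem.Chars.isalpha ch then
      let up := PySem.Chars.upperChar ch
      if up == 'J' then
        pyA_loop rest (letters ++ ['I']) na (jp ++ [(letters.length : Int)])
      else
        pyA_loop rest (letters ++ [up]) na jp
    else
      pyA_loop rest letters (na ++ [(idx, String.mk [ch])]) jp

def record_non_alpha_and_letters_py (text : String) :
    String × (List (Int × String)) × List Int × Int :=
  let r := pyA_loop (PySem.List.enumerate text.toList 0) [] [] []
  (String.mk r.1, r.2.1, r.2.2, (text.toList.length : Int))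

-- ===== PORT B =====
def record_non_alpha_and_letters_py_alt (text : String) :
    String × (List (Int × String)) × List Int × Int :=
  let letters := (text.toList.filter PySem.Chars.isalpha).map PySem.Chars.upperChar
  let jp := ((PySem.List.enumerate letters 0).filter (fun p => p.2 == 'J')).map (·.1)
  let lettersOnly := letters.map (fun c => if c == 'J' then 'I' else c)
  let na := ((PySem.List.enumerate text.toList 0).filter (fun p => !PySem.Chars.isalpha p.2)).map
      (fun p => (p.1, String.mk [p.2]))
  (String.mk lettersOnly, na, jp, (text.toList.length : Int))

-- ===== PRECONDITION & SPEC =====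
def Spec_record_non_alpha_and_letters_py (text : String) (out : String × (List (Int × String)) × List Int × Int) : Prop := out = record_non_alpha_and_letters_py_alt text
instance (text : String) (out : String × (List (Int × String)) × List Int × Int) : Decidable (Spec_record_non_alpha_and_letters_py text out) := by unfold Spec_record_non_alpha_and_letters_py; infer_instance

-- ===== CLAIM (what is proved, stated in full; the proofs are below) =====
def Claim_equal_record_non_alpha_and_letters_py : Prop := ∀ (text : String), Dom_record_non_alpha_and_letters_py text → Spec_record_non_alpha_and_letters_py text (record_non_alpha_and_letters_py text)

-- ===== LEMMAS AND PROOFS =====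
-- B's components as functions of the char list (used only in the proof)
def pvLets (cs : List Char) : List Char :=
  (cs.filter PySem.Chars.isalpha).map PySem.Chars.upperChar
def pvJps (ls : List Char) (k : Int) : List Int :=
  ((PySem.List.enumerate ls k).filter (fun p => p.2 == 'J')).map (·.1)
def pvRep (ls : List Char) : List Char := ls.map (fun c => if c == 'J' then 'I' else c)
def pvNa (cs : List Char) (s : Int) : List (Int × String) :=
  ((PySem.List.enumerate cs s).filter (fun p => !PySem.Chars.isalpha p.2)).map
    (fun p => (p.1, String.mk [p.2]))

theorem pvJps_cons (c : Char) (ls : List Char) (k : Int) :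
    pvJps (c :: ls) k = (if c == 'J' then [k] else []) ++ pvJps ls (k + 1) := by
  by_cases h : c = 'J' <;> simp [pvJps, PySem.List.enumerate_cons, h]

theorem pvNa_cons (c : Char) (cs : List Char) (s : Int) :
    pvNa (c :: cs) s =
      (if PySem.Chars.isalpha c then [] else [(s, String.mk [c])]) ++ pvNa cs (s + 1) := by
  simp [pvNa, PySem.List.enumerate_cons]
  split <;> simp_all

theorem pyA_loop_eq (cs : List Char) (s : Int) (L : List Char) (N : List (Int × String))
    (J : List Int) (k : Int) (hk : k = (L.length : Int)) :
    pyA_loop (PySem.List.enumerate cs s) L N J =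
      (L ++ pvRep (pvLets cs), N ++ pvNa cs s, J ++ pvJps (pvLets cs) k) := by
  induction cs generalizing s L N J k with
  | nil => simp [PySem.List.enumerate, pyA_loop, pvRep, pvLets, pvJps, pvNa]
  | cons c cs ih =>
    rw [PySem.List.enumerate_cons]
    by_cases ha : PySem.Chars.isalpha c
    · by_cases hj : PySem.Chars.upperChar c = 'J'
      · rw [show pyA_loop ((s, c) :: PySem.List.enumerate cs (s + 1)) L N J =
            pyA_loop (PySem.List.enumerate cs (s + 1)) (L ++ ['I']) N
              (J ++ [(L.length : Int)]) by simp [pyA_loop, ha, hj]]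
        rw [ih (s + 1) (L ++ ['I']) N (J ++ [(L.length : Int)]) (k + 1) (by simp [hk])]
        simp [pvLets, ha, hj, pvRep, pvNa_cons, pvJps_cons, hk]
      · rw [show pyA_loop ((s, c) :: PySem.List.enumerate cs (s + 1)) L N J =
            pyA_loop (PySem.List.enumerate cs (s + 1)) (L ++ [PySem.Chars.upperChar c]) N J by
              simp [pyA_loop, ha, hj]]
        rw [ih (s + 1) (L ++ [PySem.Chars.upperChar c]) N J (k + 1) (by simp [hk])]
        simp [pvLets, ha, hj, pvRep, pvNa_cons, pvJps_cons, hk]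
    · rw [show pyA_loop ((s, c) :: PySem.List.enumerate cs (s + 1)) L N J =
          pyA_loop (PySem.List.enumerate cs (s + 1)) L (N ++ [(s, String.mk [c])]) J by
            simp [pyA_loop, ha]]
      rw [ih (s + 1) L (N ++ [(s, String.mk [c])]) J k hk]
      simp [pvLets, ha, pvNa_cons]

-- ===== VERDICT (by name: the statement is the Claim_ definition above) =====
theorem record_non_alpha_and_letters_py_spec : Claim_equal_record_non_alpha_and_letters_py := by
  intro text _
  unfold Spec_record_non_alpha_and_letters_py
  unfold record_non_alpha_and_letters_py record_non_alpha_and_letters_py_alt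
  rw [pyA_loop_eq text.toList 0 [] [] [] 0 (by simp)]
  simp [pvRep, pvLets, pvJps, pvNa]
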